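-- pv_equiv track=rewrite | github.com/scotttromley/dmark | src/dmark/models.py | _legitimate_dkim_failure_modes
-- ===== SOURCE A (Python) =====
-- def _legitimate_dkim_failure_modes(
--     source_ips: set[str],
--     missing_dkim_counts: dict[str, int],
--     dkim_auth_fail_counts: dict[str, int],
--     dkim_unaligned_counts: dict[str, int],
-- ) -> dict[str, int]:
--     return {
--         "dkim_missing": sum(missing_dkim_counts.get(source_ip, 0) for source_ip in source_ips),
--         "dkim_auth_fail": sum(dkim_auth_fail_counts.get(source_ip, 0) for source_ip in source_ips),
--         "dkim_pass_unaligned": sum(dkim_unaligned_counts.get(source_ip, 0) for source_ip in source_ips),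
--     }
-- ===== SOURCE B (Python) =====
-- def _legitimate_dkim_failure_modes(
--     source_ips,
--     missing_dkim_counts,
--     dkim_auth_fail_counts,
--     dkim_unaligned_counts,
-- ):
--     # Inverted traversal: scan each counts dict's items and keep only the
--     # entries whose key belongs to source_ips; absent ips contribute 0 in A,
--     # and dict keys are unique, so the totals coincide.
--     def tally(counts):
--         total = 0
--         for ip, n in counts.items():
--             if ip in source_ips:
--                 total += n
--         return total
--
--     return {
--         "dkim_missing": tally(missing_dkim_counts),
--         "dkim_auth_fail": tally(dkim_auth_fail_counts),
--         "dkim_pass_unaligned": tally(dkim_unaligned_counts),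
--     }
-- ===== Notes on version B (the rewrite author's own statement) =====
-- stated objective: alternative
-- what changed: Inverts the traversal: instead of iterating source_ips and looking each ip up in the three dicts, B iterates each counts dict's items once and adds the value when its key is a member of the source_ips set; equal because dict keys are unique and ips absent from a dict contribute 0.
import Mathlib
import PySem

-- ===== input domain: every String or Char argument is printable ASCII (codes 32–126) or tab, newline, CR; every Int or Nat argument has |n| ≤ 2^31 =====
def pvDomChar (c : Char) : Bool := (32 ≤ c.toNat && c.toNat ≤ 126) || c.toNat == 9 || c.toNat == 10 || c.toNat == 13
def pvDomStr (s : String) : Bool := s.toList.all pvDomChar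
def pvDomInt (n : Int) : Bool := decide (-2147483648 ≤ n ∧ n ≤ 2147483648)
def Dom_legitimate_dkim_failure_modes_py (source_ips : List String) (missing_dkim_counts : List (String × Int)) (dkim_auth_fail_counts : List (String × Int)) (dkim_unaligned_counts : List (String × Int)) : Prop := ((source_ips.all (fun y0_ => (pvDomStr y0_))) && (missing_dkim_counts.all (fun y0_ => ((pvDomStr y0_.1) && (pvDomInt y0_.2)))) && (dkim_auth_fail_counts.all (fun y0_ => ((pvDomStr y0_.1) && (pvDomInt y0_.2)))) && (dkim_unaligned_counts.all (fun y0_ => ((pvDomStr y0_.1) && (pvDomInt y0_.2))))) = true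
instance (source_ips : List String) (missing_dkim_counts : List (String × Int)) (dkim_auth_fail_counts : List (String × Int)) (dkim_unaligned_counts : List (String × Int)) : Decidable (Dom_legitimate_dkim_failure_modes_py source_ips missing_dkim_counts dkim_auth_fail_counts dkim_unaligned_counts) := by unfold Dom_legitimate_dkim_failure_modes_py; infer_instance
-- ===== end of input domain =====

-- B inverts the traversal: instead of summing dict lookups over source_ips (A), it scans each
-- counts dict's entries once and adds the value when the key is a member of the source_ips set
-- (alternative algorithm, same result since dict keys are unique and absent ips contribute 0).


-- ===== PORT A =====
-- dict.get(k, 0): first matching key, else 0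
def pvGetD (d : List (String × Int)) (k : String) : Int :=
  match d.find? (fun p => p.1 == k) with
  | some p => p.2
  | none => 0

-- A: three separate sums over source_ips, one dict lookup per ip
def legitimate_dkim_failure_modes_py (source_ips : List String) (missing_dkim_counts : List (String × Int)) (dkim_auth_fail_counts : List (String × Int)) (dkim_unaligned_counts : List (String × Int)) : List (String × Int) :=
  [("dkim_missing", source_ips.foldl (fun a ip => a + pvGetD missing_dkim_counts ip) 0),
   ("dkim_auth_fail", source_ips.foldl (fun a ip => a + pvGetD dkim_auth_fail_counts ip) 0),
   ("dkim_pass_unaligned", source_ips.foldl (fun a ip => a + pvGetD dkim_unaligned_counts ip) 0)]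

-- ===== PORT B =====
-- B's tally: scan the dict's items, adding v whenever its key is in source_ips
def pvTally (source_ips : List String) (counts : List (String × Int)) : Int :=
  counts.foldl (fun total p => if source_ips.contains p.1 then total + p.2 else total) 0

def legitimate_dkim_failure_modes_py_alt (source_ips : List String) (missing_dkim_counts : List (String × Int)) (dkim_auth_fail_counts : List (String × Int)) (dkim_unaligned_counts : List (String × Int)) : List (String × Int) :=
  [("dkim_missing", pvTally source_ips missing_dkim_counts),
   ("dkim_auth_fail", pvTally source_ips dkim_auth_fail_counts),
   ("dkim_pass_unaligned", pvTally source_ips dkim_unaligned_counts)]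

-- ===== PRECONDITION & SPEC =====
-- Pre_ only rules out encoding-level duplicates that no real Python input has: source_ips encodes a
-- Python set (distinct elements) and each counts argument a dict (distinct keys), so it excludes no
-- input the Python A actually receives.
def Pre_legitimate_dkim_failure_modes_py (source_ips : List String) (missing_dkim_counts : List (String × Int)) (dkim_auth_fail_counts : List (String × Int)) (dkim_unaligned_counts : List (String × Int)) : Prop :=
  source_ips.Nodup ∧ (missing_dkim_counts.map Prod.fst).Nodup ∧ (dkim_auth_fail_counts.map Prod.fst).Nodup ∧ (dkim_unaligned_counts.map Prod.fst).Nodup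
instance (source_ips : List String) (missing_dkim_counts : List (String × Int)) (dkim_auth_fail_counts : List (String × Int)) (dkim_unaligned_counts : List (String × Int)) : Decidable (Pre_legitimate_dkim_failure_modes_py source_ips missing_dkim_counts dkim_auth_fail_counts dkim_unaligned_counts) := by unfold Pre_legitimate_dkim_failure_modes_py; infer_instance

def pvWitness_legitimate_dkim_failure_modes_py : List String × (List (String × Int)) × (List (String × Int)) × (List (String × Int)) :=
  (["1.2.3.4", "5.6.7.8"], [("1.2.3.4", 3)], [("5.6.7.8", 2), ("9.9.9.9", 1)], [])

def Spec_legitimate_dkim_failure_modes_py (source_ips : List String) (missing_dkim_counts : List (String × Int)) (dkim_auth_fail_counts : List (String × Int)) (dkim_unaligned_counts : List (String × Int)) (out : List (String × Int)) : Prop := out = legitimate_dkim_failure_modes_py_alt source_ips missing_dkim_counts dkim_auth_fail_counts dkim_unaligned_counts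
instance (source_ips : List String) (missing_dkim_counts : List (String × Int)) (dkim_auth_fail_counts : List (String × Int)) (dkim_unaligned_counts : List (String × Int)) (out : List (String × Int)) : Decidable (Spec_legitimate_dkim_failure_modes_py source_ips missing_dkim_counts dkim_auth_fail_counts dkim_unaligned_counts out) := by unfold Spec_legitimate_dkim_failure_modes_py; infer_instance

-- ===== CLAIM (what is proved, stated in full; the proofs are below) =====
def Claim_equal_legitimate_dkim_failure_modes_py : Prop := ∀ (source_ips : List String) (missing_dkim_counts : List (String × Int)) (dkim_auth_fail_counts : List (String × Int)) (dkim_unaligned_counts : List (String × Int)), Dom_legitimate_dkim_failure_modes_py source_ips missing_dkim_counts dkim_auth_fail_counts dkim_unaligned_counts → Pre_legitimate_dkim_failure_modes_py source_ips missing_dkim_counts dkim_auth_fail_counts dkim_unaligned_counts → Spec_legitimate_dkim_failure_modes_py source_ips missing_dkim_counts dkim_auth_fail_counts dkim_unaligned_counts (legitimate_dkim_failure_modes_py source_ips missing_dkim_counts dkim_auth_fail_counts dkim_unaligned_counts)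

-- ===== LEMMAS AND PROOFS =====
theorem pv_foldl_add (ips : List String) (F : String → Int) (s : Int) :
    ips.foldl (fun a ip => a + F ip) s = s + (ips.map F).sum := by
  induction ips generalizing s with
  | nil => simp
  | cons x xs ih => simp [List.foldl, ih]; ring

theorem pv_tally_aux (ips : List String) (d : List (String × Int)) (s : Int) :
    d.foldl (fun total p => if ips.contains p.1 then total + p.2 else total) s
      = s + (d.map (fun p => if p.1 ∈ ips then p.2 else 0)).sum := by
  induction d generalizing s with
  | nil => simp
  | cons q r ih =>
      simp only [List.foldl, List.map, List.sum_cons]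
      rw [ih]
      by_cases h : q.1 ∈ ips
      · simp [h]; ring
      · simp [h]

theorem pv_tally_sum (ips : List String) (d : List (String × Int)) :
    pvTally ips d = (d.map (fun p => if p.1 ∈ ips then p.2 else 0)).sum := by
  unfold pvTally
  rw [pv_tally_aux]
  ring

theorem pv_getD_not_mem (d : List (String × Int)) (k : String) (h : k ∉ d.map Prod.fst) :
    pvGetD d k = 0 := by
  induction d with
  | nil => rfl
  | cons q r ih =>
      simp only [List.map, List.mem_cons, not_or] at h
      have hne : ¬ q.1 = k := fun e => h.1 e.symm
      simp only [pvGetD, List.find?]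
      rw [show (q.1 == k) = false by simp [hne]]
      exact ih h.2

theorem pv_sum_ite (ips : List String) (k : String) (v : Int) (G : String → Int)
    (hnd : ips.Nodup) :
    (ips.map (fun ip => if k = ip then v else G ip)).sum
      = (ips.map G).sum + (if k ∈ ips then v - G k else 0) := by
  induction ips with
  | nil => simp
  | cons x xs ih =>
      simp only [List.nodup_cons] at hnd
      simp only [List.map, List.sum_cons, List.mem_cons]
      rw [ih hnd.2]
      by_cases hk : k = x
      · subst hk
        have : k ∉ xs := hnd.1
        simp [this]
        ring
      · simp [hk]
        split_ifs <;> ring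

theorem pv_main (ips : List String) (d : List (String × Int))
    (hips : ips.Nodup) (hd : (d.map Prod.fst).Nodup) :
    (ips.map (pvGetD d)).sum = (d.map (fun p => if p.1 ∈ ips then p.2 else 0)).sum := by
  induction d with
  | nil =>
      have h0 : ips.map (pvGetD []) = ips.map (fun _ => (0 : Int)) :=
        List.map_congr_left (fun _ _ => rfl)
      simp [h0]
  | cons q r ih =>
      simp only [List.map, List.nodup_cons] at hd
      have step : ∀ ip, pvGetD (q :: r) ip = if q.1 = ip then q.2 else pvGetD r ip := by
        intro ip
        simp only [pvGetD, List.find?]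
        by_cases h : q.1 = ip
        · simp [h]
        · have : (q.1 == ip) = false := by simp [h]
          rw [this]
          simp [h]
      calc (ips.map (pvGetD (q :: r))).sum
          = (ips.map (fun ip => if q.1 = ip then q.2 else pvGetD r ip)).sum := by
            congr 1; exact List.map_congr_left (fun ip _ => step ip)
        _ = (ips.map (pvGetD r)).sum + (if q.1 ∈ ips then q.2 - pvGetD r q.1 else 0) := by
            exact pv_sum_ite ips q.1 q.2 (pvGetD r) hips
        _ = (r.map (fun p => if p.1 ∈ ips then p.2 else 0)).sum + (if q.1 ∈ ips then q.2 else 0) := by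
            rw [ih hd.2, pv_getD_not_mem r q.1 hd.1]
            split_ifs <;> ring
        _ = ((q :: r).map (fun p => if p.1 ∈ ips then p.2 else 0)).sum := by
            simp only [List.map, List.sum_cons]; ring

-- ===== VERDICT (by name: the statement is the Claim_ definition above) =====
theorem legitimate_dkim_failure_modes_py_spec : Claim_equal_legitimate_dkim_failure_modes_py := by
  intro ips m af un _ hpre
  obtain ⟨h1, h2, h3, h4⟩ := hpre
  unfold Spec_legitimate_dkim_failure_modes_py
  unfold legitimate_dkim_failure_modes_py legitimate_dkim_failure_modes_py_alt
  rw [pv_foldl_add, pv_foldl_add, pv_foldl_add,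
      pv_tally_sum, pv_tally_sum, pv_tally_sum,
      pv_main ips m h1 h2, pv_main ips af h1 h3, pv_main ips un h1 h4]
  simp
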